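-- pv_equiv track=rewrite | github.com/nickengle4292/EE361 | Project1/keywordFunctions.py | textToString
-- ===== SOURCE A (Python) =====
-- def textToString(s):
--     words = []
--     current_word = ''
--     for c in s:
--         if c.isalpha() or c.isdigit() or c == '_':
--             current_word += c
--         else:
--             if current_word:
--                 words.append(current_word)
--                 current_word = ''
--     if current_word:
--         words.append(current_word)
--     return words
-- ===== SOURCE B (Python) =====
-- def textToString(s):
--     def isword(c):
--         return c.isalpha() or c.isdigit() or c == '_'
--     words = []
--     i = 0
--     n = len(s)
--     while i < n:
--         if isword(s[i]):
--             j = i + 1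
--             while j < n and isword(s[j]):
--                 j += 1
--             words.append(s[i:j])
--             i = j
--         else:
--             i += 1
--     return words
-- ===== Notes on version B (the rewrite author's own statement) =====
-- stated objective: alternative
-- what changed: B scans with two index pointers, finding each maximal word run at once and slicing it out, instead of A's char-by-char accumulator string with flush-on-delimiter.
import Mathlib
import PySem

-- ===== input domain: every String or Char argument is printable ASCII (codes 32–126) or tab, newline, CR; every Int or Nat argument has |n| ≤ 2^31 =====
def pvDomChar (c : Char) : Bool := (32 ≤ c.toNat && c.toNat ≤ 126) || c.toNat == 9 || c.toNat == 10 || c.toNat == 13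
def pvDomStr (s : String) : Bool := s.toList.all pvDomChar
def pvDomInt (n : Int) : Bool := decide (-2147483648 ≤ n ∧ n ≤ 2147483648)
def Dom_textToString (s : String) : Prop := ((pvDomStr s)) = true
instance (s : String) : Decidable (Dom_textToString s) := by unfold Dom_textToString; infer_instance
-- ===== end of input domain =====

-- B scans with two pointers, slicing each maximal word run out at once, instead of A's
-- char-by-char accumulator with flush-on-delimiter; alternative decomposition, same cost.

-- word-character predicate: c.isalpha() or c.isdigit() or c == '_' (exact on the ASCII domain)
def pvIsWord (c : Char) : Bool := c.isAlpha || c.isDigit || c == '_'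

-- ===== PORT A =====
-- A's loop: current_word accumulates word chars, is flushed to words on a delimiter
-- and once more after the loop (the base case here).
def pvALoop : List Char → List Char → List String
  | [], cur => if cur.isEmpty then [] else [String.mk cur]
  | c :: rest, cur =>
    if pvIsWord c then pvALoop rest (cur ++ [c])
    else if cur.isEmpty then pvALoop rest [] else String.mk cur :: pvALoop rest []

def textToString (s : String) : List String := pvALoop s.toList []

-- ===== PORT B =====
-- B's outer while: at a word char, the inner while (takeWhile) finds the end of the run,
-- the slice s[i:j] is the run, and i jumps to j (dropWhile); at a delimiter, i += 1.
def pvBGo : List Char → List String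
  | [] => []
  | c :: rest =>
    if pvIsWord c then
      String.mk (c :: rest.takeWhile pvIsWord) :: pvBGo (rest.dropWhile pvIsWord)
    else pvBGo rest
termination_by l => l.length
decreasing_by
  · simpa using Nat.lt_succ_of_le (List.length_dropWhile_le pvIsWord rest)
  · simp

def textToString_alt (s : String) : List String := pvBGo s.toList

-- ===== PRECONDITION & SPEC =====
def Spec_textToString (s : String) (out : List String) : Prop := out = textToString_alt s
instance (s : String) (out : List String) : Decidable (Spec_textToString s out) := by unfold Spec_textToString; infer_instance

-- ===== CLAIM (what is proved, stated in full; the proofs are below) =====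
def Claim_equal_textToString : Prop := ∀ (s : String), Dom_textToString s → Spec_textToString s (textToString s)

-- ===== LEMMAS AND PROOFS =====

-- consuming a run of word characters just extends the accumulator
theorem pvALoop_word_run (run : List Char) (h : ∀ c ∈ run, pvIsWord c = true) :
    ∀ rest cur, pvALoop (run ++ rest) cur = pvALoop rest (cur ++ run) := by
  induction run with
  | nil => intro rest cur; simp
  | cons a rs ih =>
    intro rest cur
    have ha : pvIsWord a = true := h a (by simp)
    have hrs : ∀ c ∈ rs, pvIsWord c = true := fun c hc => h c (by simp [hc])
    simp [pvALoop, ha, ih hrs]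

theorem pvMain : ∀ l : List Char, pvALoop l [] = pvBGo l
  | [] => by simp [pvALoop, pvBGo]
  | c :: rest => by
    by_cases hc : pvIsWord c = true
    · have hsplit : rest = rest.takeWhile pvIsWord ++ rest.dropWhile pvIsWord :=
        (List.takeWhile_append_dropWhile).symm
      have hall : ∀ d ∈ c :: rest.takeWhile pvIsWord, pvIsWord d = true := by
        intro d hd
        rcases List.mem_cons.mp hd with h | h
        · exact h ▸ hc
        · exact List.mem_takeWhile_imp h
      have h1 : pvALoop (c :: rest) [] =
          pvALoop (rest.dropWhile pvIsWord) ([] ++ (c :: rest.takeWhile pvIsWord)) := by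
        conv_lhs => rw [hsplit]
        exact pvALoop_word_run (c :: rest.takeWhile pvIsWord) hall (rest.dropWhile pvIsWord) []
      rw [h1]
      rw [show pvBGo (c :: rest) =
            String.mk (c :: rest.takeWhile pvIsWord) :: pvBGo (rest.dropWhile pvIsWord) from by
          rw [pvBGo]; simp [hc]]
      cases hdw : rest.dropWhile pvIsWord with
      | nil => simp [pvALoop, pvBGo]
      | cons d t =>
        have h0 : 0 < (rest.dropWhile pvIsWord).length := by rw [hdw]; simp
        have hd : pvIsWord d = false := by
          have hnot := List.dropWhile_get_zero_not pvIsWord rest h0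
          rw [List.get_eq_getElem] at hnot
          simp only [hdw] at hnot
          simpa using hnot
        have hlt : t.length < (c :: rest).length := by
          have hlen : (rest.dropWhile pvIsWord).length ≤ rest.length :=
            List.length_dropWhile_le pvIsWord rest
          rw [hdw] at hlen
          simp at hlen ⊢
          omega
        have ih := pvMain t
        rw [show pvBGo (d :: t) = pvBGo t from by rw [pvBGo]; simp [hd]]
        simp [pvALoop, hd, ih]
    · have ih := pvMain rest
      rw [show pvBGo (c :: rest) = pvBGo rest from by rw [pvBGo]; simp [hc]]
      simp [pvALoop, hc, ih]
termination_by l => l.length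
decreasing_by
  · simp at hlt ⊢; omega
  · simp

-- ===== VERDICT (by name: the statement is the Claim_ definition above) =====
theorem textToString_spec : Claim_equal_textToString := by
  intro s _
  unfold Spec_textToString textToString textToString_alt
  exact pvMain s.toList
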